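-- pv_equiv track=rewrite | github.com/L-Forster/open-jet | src/context_index.py | _extract_project_summary
-- ===== SOURCE A (Python) =====
-- def _extract_project_summary(text: str) -> str:
--     if not text.strip():
--         return ""
--     lines = ["PROJECT CONTEXT SUMMARY"]
--     for heading in ("## What This Project Is", "## Engineering Rules", "## Hardware And Performance Assumptions"):
--         section = _section_lines(text, heading)
--         cleaned = _compact_lines(section, limit=4 if heading == "## What This Project Is" else 3)
--         if not cleaned:
--             continue
--         title = heading.replace("## ", "")
--         lines.append(f"{title}:")
--         lines.extend(cleaned)
--     return "\n".join(lines)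
--
-- def _section_lines(text: str, heading: str) -> list[str]:
--     lines = text.splitlines()
--     capture = False
--     collected: list[str] = []
--     for line in lines:
--         if line.startswith("## "):
--             if line.strip() == heading:
--                 capture = True
--                 continue
--             if capture:
--                 break
--         if capture:
--             collected.append(line)
--     return collected
--
-- def _compact_lines(lines: list[str], *, limit: int) -> list[str]:
--     cleaned: list[str] = []
--     for line in lines:
--         stripped = line.strip()
--         if not stripped:
--             continue
--         if stripped.startswith("- "):
--             stripped = stripped[2:].strip()
--         cleaned.append(stripped)
--         if len(cleaned) >= limit:
--             break
--     return cleaned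
-- ===== SOURCE B (Python) =====
-- HEADINGS = ("## What This Project Is", "## Engineering Rules", "## Hardware And Performance Assumptions")
--
--
-- def _extract_project_summary(text: str) -> str:
--     if not text.strip():
--         return ""
--     # single pass: tag every content line with the target section it belongs to
--     tagged = []
--     started = []
--     current = None
--     for line in text.splitlines():
--         if line.startswith("## "):
--             s = line.strip()
--             if s != current:
--                 if s in HEADINGS and s not in started:
--                     current = s
--                     started.append(s)
--                 else:
--                     current = None
--         elif current is not None:
--             tagged.append((current, line))
--     out = ["PROJECT CONTEXT SUMMARY"]
--     for h in HEADINGS: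
--         cleaned = _compact([l for c, l in tagged if c == h],
--                            4 if h == "## What This Project Is" else 3)
--         if cleaned:
--             out.append(h[3:] + ":")
--             out.extend(cleaned)
--     return "\n".join(out)
--
--
-- def _compact(lines, limit):
--     cleaned = []
--     for line in lines:
--         s = line.strip()
--         if not s:
--             continue
--         if s.startswith("- "):
--             s = s[2:].strip()
--         cleaned.append(s)
--         if len(cleaned) >= limit:
--             break
--     return cleaned
-- ===== Notes on version B (the rewrite author's own statement) =====
-- stated objective: alternative
-- what changed: B replaces A's three separate re-scans of the whole text (one _section_lines call per heading) by a single pass that tags each content line with the section it belongs to, then slices the tagged list per heading; section extraction state (current/started) replaces A's capture/break flags.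
import Mathlib
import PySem

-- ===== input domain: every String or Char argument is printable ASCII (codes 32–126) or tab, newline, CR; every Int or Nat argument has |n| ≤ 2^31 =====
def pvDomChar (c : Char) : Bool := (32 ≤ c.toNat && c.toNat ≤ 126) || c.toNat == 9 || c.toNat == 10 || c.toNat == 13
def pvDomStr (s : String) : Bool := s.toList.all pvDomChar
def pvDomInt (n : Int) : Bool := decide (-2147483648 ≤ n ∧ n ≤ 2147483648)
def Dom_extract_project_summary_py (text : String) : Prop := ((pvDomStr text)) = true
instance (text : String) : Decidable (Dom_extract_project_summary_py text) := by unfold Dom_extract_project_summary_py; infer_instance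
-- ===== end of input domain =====

-- B replaces A's three whole-text re-scans by a single tagging pass over the lines; same return value, no speed claim.

def pvHeadings : List String :=
  ["## What This Project Is", "## Engineering Rules", "## Hardware And Performance Assumptions"]

-- ===== PORT A =====
-- _section_lines loop: capture flag, break on a different "## " line while capturing
def pvSecGo (heading : String) : List String → Bool → List String → List String
  | [], _, acc => acc
  | l :: ls, cap, acc =>
    if PySem.Str.startswith l "## " then
      if PySem.Str.strip l = heading then pvSecGo heading ls true acc
      else if cap then acc
      else pvSecGo heading ls cap acc
    else if cap then pvSecGo heading ls cap (acc ++ [l])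
    else pvSecGo heading ls cap acc

def pvSectionLines (text heading : String) : List String :=
  pvSecGo heading (PySem.Str.splitlines text) false []

-- _compact_lines loop (A's copy)
def pvCompactGoA (limit : Nat) : List String → List String → List String
  | [], acc => acc
  | l :: ls, acc =>
    let s := PySem.Str.strip l
    if s = "" then pvCompactGoA limit ls acc
    else
      let s' := if PySem.Str.startswith s "- " then PySem.Str.strip (PySem.Str.slice s (some 2) none) else s
      let acc' := acc ++ [s']
      if limit ≤ acc'.length then acc' else pvCompactGoA limit ls acc'

def pvCompactLinesA (ls : List String) (limit : Nat) : List String := pvCompactGoA limit ls []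

def extract_project_summary_py (text : String) : String :=
  if PySem.Str.strip text = "" then ""
  else
    let lines := pvHeadings.foldl (fun lines heading =>
      let cleaned := pvCompactLinesA (pvSectionLines text heading)
        (if heading = "## What This Project Is" then 4 else 3)
      if cleaned = [] then lines
      else lines ++ [PySem.Str.replace heading "## " "" ++ ":"] ++ cleaned)
      ["PROJECT CONTEXT SUMMARY"]
    PySem.Str.join "\n" lines

-- ===== PORT B =====
-- single tagging pass: state (current section, started headings, tagged content lines)
def pvTagGo : List String → Option String → List String → List (String × String) → List (String × String)
  | [], _, _, tagged => tagged
  | l :: ls, current, started, tagged =>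
    if PySem.Str.startswith l "## " then
      let s := PySem.Str.strip l
      if some s = current then pvTagGo ls current started tagged
      else if s ∈ pvHeadings ∧ s ∉ started then pvTagGo ls (some s) (started ++ [s]) tagged
      else pvTagGo ls none started tagged
    else match current with
      | some c => pvTagGo ls current started (tagged ++ [(c, l)])
      | none => pvTagGo ls current started tagged

-- _compact loop (B's copy)
def pvCompactGoB (limit : Nat) : List String → List String → List String
  | [], acc => acc
  | l :: ls, acc =>
    let s := PySem.Str.strip l
    if s = "" then pvCompactGoB limit ls acc
    else
      let s' := if PySem.Str.startswith s "- " then PySem.Str.strip (PySem.Str.slice s (some 2) none) else s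
      let acc' := acc ++ [s']
      if limit ≤ acc'.length then acc' else pvCompactGoB limit ls acc'

def extract_project_summary_py_alt (text : String) : String :=
  if PySem.Str.strip text = "" then ""
  else
    let tagged := pvTagGo (PySem.Str.splitlines text) none [] []
    let out := pvHeadings.foldl (fun out h =>
      let cleaned := pvCompactGoB (if h = "## What This Project Is" then 4 else 3)
        ((tagged.filter (fun p => p.1 = h)).map Prod.snd) []
      if cleaned = [] then out
      else out ++ [PySem.Str.slice h (some 3) none ++ ":"] ++ cleaned)
      ["PROJECT CONTEXT SUMMARY"]
    PySem.Str.join "\n" out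

-- ===== PRECONDITION & SPEC =====
def Spec_extract_project_summary_py (text : String) (out : String) : Prop := out = extract_project_summary_py_alt text
instance (text : String) (out : String) : Decidable (Spec_extract_project_summary_py text out) := by unfold Spec_extract_project_summary_py; infer_instance

-- ===== CLAIM (what is proved, stated in full; the proofs are below) =====
def Claim_equal_extract_project_summary_py : Prop := ∀ (text : String), Dom_extract_project_summary_py text → Spec_extract_project_summary_py text (extract_project_summary_py text)

-- ===== LEMMAS AND PROOFS =====

-- the two compaction helpers are the same loop
theorem pvCompact_eq (limit : Nat) (ls acc : List String) :
    pvCompactGoB limit ls acc = pvCompactGoA limit ls acc := by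
  induction ls generalizing acc with
  | nil => rfl
  | cons l ls ih => simp only [pvCompactGoA, pvCompactGoB]; split_ifs <;> simp [ih]

theorem pvSecGo_acc (H : String) (ls : List String) (cap : Bool) (acc : List String) :
    pvSecGo H ls cap acc = acc ++ pvSecGo H ls cap [] := by
  induction ls generalizing cap acc with
  | nil => simp [pvSecGo]
  | cons l ls ih =>
    simp only [pvSecGo]
    split_ifs <;> simp [ih _ acc, ih _ (acc ++ [l]), ih _ ([l])]

def pvFiltH (H : String) (tagged : List (String × String)) : List String :=
  (tagged.filter (fun p => p.1 = H)).map Prod.snd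

theorem pvFiltH_append (H : String) (t u : List (String × String)) :
    pvFiltH H (t ++ u) = pvFiltH H t ++ pvFiltH H u := by
  simp [pvFiltH]

-- key invariant: B's single tagging pass, projected to one target heading H, computes
-- exactly what A's per-heading capture/break scan collects from the remaining lines
theorem pvTagGo_filter (H : String) (hH : H ∈ pvHeadings) :
    ∀ (ls : List String) (current : Option String) (started : List String)
      (tagged : List (String × String)),
      (current = some H → H ∈ started) →
      pvFiltH H (pvTagGo ls current started tagged)
        = pvFiltH H tagged ++
          (if current = some H then pvSecGo H ls true []
           else if H ∈ started then [] else pvSecGo H ls false []) := by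
  intro ls
  induction ls with
  | nil => intro current started tagged hinv; split_ifs <;> simp [pvTagGo, pvSecGo]
  | cons l ls ih =>
    intro current started tagged hinv
    by_cases hsw : PySem.Str.startswith l "## " = true
    all_goals simp at hsw
    · set s := PySem.Str.strip l with hs
      by_cases hc : some s = current
      · -- duplicate of the current heading: state unchanged, A keeps capturing
        rw [show pvTagGo (l :: ls) current started tagged = pvTagGo ls current started tagged by
              simp [pvTagGo, hsw, ← hs, hc]]
        rw [ih current started tagged hinv]
        by_cases hcurH : current = some H
        · have hsH : s = H := by rw [hcurH] at hc; exact Option.some.inj hc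
          simp [pvSecGo, hsw, ← hs, hsH, hcurH]
        · have hsne : s ≠ H := fun h => hcurH (by rw [← hc, h])
          by_cases hst : H ∈ started <;> simp [pvSecGo, hsw, ← hs, hsne, hcurH, hst]
      · by_cases hnew : s ∈ pvHeadings ∧ s ∉ started
        · -- a fresh target heading starts capturing
          rw [show pvTagGo (l :: ls) current started tagged
                = pvTagGo ls (some s) (started ++ [s]) tagged by
              simp [pvTagGo, hsw, ← hs, hc, hnew]]
          have hinv' : some s = some H → H ∈ started ++ [s] := by
            intro h; simp [Option.some.inj h]
          rw [ih (some s) (started ++ [s]) tagged (by intro h; exact hinv' (by rw [h]))]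
          by_cases hsH : s = H
          · have hcurH : current ≠ some H := fun h => hc (by rw [h, hsH])
            have hst : H ∉ started := by rw [← hsH]; exact hnew.2
            simp [pvSecGo, hsw, ← hs, hsH, hcurH, hst]
          · have hstH : H ∈ started ++ [s] ↔ H ∈ started := by
              simp [List.mem_append, Ne.symm hsH]
            by_cases hcurH : current = some H
            · have hst : H ∈ started := hinv hcurH
              simp [pvSecGo, hsw, ← hs, hsH, hcurH, hst, hstH]
            · by_cases hst : H ∈ started <;>
                simp [pvSecGo, hsw, ← hs, hsH, hcurH, hst, hstH]
        · -- boundary line: capturing (if any) ends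
          rw [show pvTagGo (l :: ls) current started tagged
                = pvTagGo ls none started tagged by
              simp [pvTagGo, hsw, ← hs, hc, hnew]]
          rw [ih none started tagged (by simp)]
          by_cases hsH : s = H
          · have hst : H ∈ started := by
              rcases not_and_or.mp hnew with h | h
              · exact absurd (hsH ▸ hH) h
              · rw [← hsH]; exact not_not.mp h
            have hcurH : current ≠ some H := fun h => hc (by rw [h, hsH])
            simp [hcurH, hst]
          · by_cases hcurH : current = some H
            · have hst : H ∈ started := hinv hcurH
              simp [pvSecGo, hsw, ← hs, hsH, hcurH, hst]
            · by_cases hst : H ∈ started <;> simp [pvSecGo, hsw, ← hs, hsH, hcurH, hst]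
    · -- content line
      cases current with
      | some c =>
        rw [show pvTagGo (l :: ls) (some c) started tagged
              = pvTagGo ls (some c) started (tagged ++ [(c, l)]) by
            simp [pvTagGo, hsw]]
        rw [ih (some c) started (tagged ++ [(c, l)]) hinv, pvFiltH_append]
        by_cases hcH : c = H
        · have : (some c : Option String) = some H := by rw [hcH]
          simp [pvSecGo, hsw, pvFiltH, hcH, pvSecGo_acc H ls true [l]]
        · have hne : (some c : Option String) ≠ some H := by simp [hcH]
          by_cases hst : H ∈ started <;> simp [pvSecGo, hsw, pvFiltH, hcH, hne, hst]
      | none =>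
        rw [show pvTagGo (l :: ls) none started tagged = pvTagGo ls none started tagged by
            simp [pvTagGo, hsw]]
        rw [ih none started tagged (by simp)]
        by_cases hst : H ∈ started <;> simp [pvSecGo, hsw, hst]

-- specialisation to the initial state: per heading, B's projection = A's section scan
theorem pvSection_eq (text H : String) (hH : H ∈ pvHeadings) :
    pvFiltH H (pvTagGo (PySem.Str.splitlines text) none [] []) = pvSectionLines text H := by
  rw [pvTagGo_filter H hH (PySem.Str.splitlines text) none [] [] (by simp)]
  simp [pvFiltH, pvSectionLines]

-- "## X".replace("## ", "") = "## X"[3:] for the three fixed headings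
theorem pvTitle_eq (H : String) (hH : H ∈ pvHeadings) :
    PySem.Str.replace H "## " "" = PySem.Str.slice H (some 3) none := by
  fin_cases hH <;> decide

-- ===== VERDICT (by name: the statement is the Claim_ definition above) =====
theorem extract_project_summary_py_spec : Claim_equal_extract_project_summary_py := by
  intro text _
  unfold Spec_extract_project_summary_py
  unfold extract_project_summary_py extract_project_summary_py_alt
  by_cases he : PySem.Str.strip text = ""
  · simp [he]
  · simp only [he, if_false]
    congr 1
    apply PySem.List.foldl_congr_mem
    intro acc h hmem
    rw [show ((pvTagGo (PySem.Str.splitlines text) none [] []).filter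
            (fun p => p.1 = h)).map Prod.snd = pvSectionLines text h from pvSection_eq text h hmem]
    rw [pvCompact_eq, pvTitle_eq h hmem]
    rfl
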